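-- pv_equiv track=rewrite | github.com/bhavinmahendra/2022_11_MINESWEEPER | main.py | obtem_numero_minas_vizinhas
-- ===== SOURCE A (Python) =====
-- def str_para_coordenada(s):
--     '''
--     str -> coordenada
--     devolve a coordenada correspondente a cadeia de caracteres s
--     '''
--     colunas = 'ABCDEFGHIJKLMNOPQRSTUVWXYZ'
--     linhas = '0123456789'
--
--     if len(s) != 3 or s[1] not in linhas or s[2] not in linhas:
--         return (None, None)
--
--     col = s[0]
--     lin = int(s[1:])
--     if type(col) == str and col in colunas and type(lin) == int and lin in range(1, 100):
--         return (col, lin)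
--
-- def obtem_numero_minas_vizinhas(m, c):
--     '''
--     campo x coordenada -> int
--     devolve o numero de parcelas vizinhas com minas
--     '''
--     for i in range(len(m)):
--         if c == str_para_coordenada(m[i][0]):
--             break
--
--     a11 = chr(ord(c[0]) - 1) + str(f'{c[1] - 1:02d}')
--     a12 = c[0] + str(f'{c[1] - 1:02d}')
--     a13 = chr(ord(c[0]) + 1) + str(f'{c[1] - 1:02d}')
--     a21 = chr(ord(c[0]) - 1) + str(f'{c[1]:02d}')
--     a23 = chr(ord(c[0]) + 1) + str(f'{c[1]:02d}')
--     a31 = chr(ord(c[0]) - 1) + str(f'{c[1] + 1:02d}')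
--     a32 = c[0] + str(f'{c[1] + 1:02d}')
--     a33 = chr(ord(c[0]) + 1) + str(f'{c[1] + 1:02d}')
--     cont = 0
--     for i in m:
--         if i[0] in [a11, a12, a13, a21, a23, a31, a32, a33]:
--             if i[1][1] == 'com mina':
--                 cont += 1
--     return cont
-- ===== SOURCE B (Python) =====
-- def obtem_numero_minas_vizinhas(m, c):
--     # one pass: count mined cells per coordinate string, then sum the 8 neighbor lookups
--     index = {}
--     for i in m:
--         if len(i[1]) > 1 and i[1][1] == 'com mina':
--             index[i[0]] = index.get(i[0], 0) + 1
--     o, r = ord(c[0]), c[1]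
--     viz = {chr(o + dc) + f'{r + dr:02d}'
--            for dc in (-1, 0, 1) for dr in (-1, 0, 1) if (dc, dr) != (0, 0)}
--     return sum(index.get(s, 0) for s in viz)
-- ===== Notes on version B (the rewrite author's own statement) =====
-- stated objective: alternative
-- what changed: B drops A's dead coordinate-parsing loop and replaces A's per-entry scan with an 8-way string-membership test by one pass that builds a dict counting mined cells per coordinate string and then sums eight dict lookups of the neighbor strings (built with the same chr/ord and {:02d} formatting).
import Mathlib
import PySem

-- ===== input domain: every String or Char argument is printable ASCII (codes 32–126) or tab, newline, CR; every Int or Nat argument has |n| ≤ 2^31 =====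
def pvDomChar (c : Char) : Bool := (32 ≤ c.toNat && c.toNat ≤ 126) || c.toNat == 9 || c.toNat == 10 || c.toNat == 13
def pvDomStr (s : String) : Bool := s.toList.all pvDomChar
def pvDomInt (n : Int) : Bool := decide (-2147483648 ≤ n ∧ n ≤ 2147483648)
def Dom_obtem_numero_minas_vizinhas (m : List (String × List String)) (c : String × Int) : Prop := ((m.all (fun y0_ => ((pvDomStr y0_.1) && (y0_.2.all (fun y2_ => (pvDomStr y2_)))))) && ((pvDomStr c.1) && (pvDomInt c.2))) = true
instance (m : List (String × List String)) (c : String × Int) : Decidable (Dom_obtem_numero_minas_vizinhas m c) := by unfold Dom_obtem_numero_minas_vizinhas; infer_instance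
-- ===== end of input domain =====

-- B replaces A's per-entry 8-string membership scan (and dead parsing loop) by one counting
-- pass into a dict plus eight neighbor-string lookups (objective: alternative).


-- shared helper: exact port of Python's f'{x:02d}' (zero-pad to width 2; a sign counts
-- toward the width, so only 0..9 get a leading '0'), as a character list
def fmt02 (x : Int) : List Char :=
  if 0 ≤ x ∧ x < 10 then '0' :: PySem.Int.toChars x else PySem.Int.toChars x

-- ===== PORT A =====
-- port of str_para_coordenada (dead code for the result: only used by A's break-search loop)
def str_para_coordenada (s : String) : Option (Option String × Option Int) :=
  let colunas := "ABCDEFGHIJKLMNOPQRSTUVWXYZ".toList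
  let linhas := "0123456789".toList
  let cs := s.toList
  if cs.length ≠ 3 ∨ cs.getD 1 ' ' ∉ linhas ∨ cs.getD 2 ' ' ∉ linhas then
    some (none, none)
  else
    -- int(s[1:]) cannot raise here: the guard ensured both characters are digits
    let col := String.ofList (cs.take 1)
    let lin := (PySem.Int.ofStr? (String.ofList (cs.drop 1))).getD 0
    -- type(col) == str and type(lin) == int are always true; 1-char 'col in colunas'
    -- is character membership
    if cs.getD 0 ' ' ∈ colunas ∧ 1 ≤ lin ∧ lin < 100 then some (some col, some lin)
    else none  -- Python falls off the function: returns None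

def obtem_numero_minas_vizinhas (m : List (String × List String)) (c : String × Int) : Int :=
  -- A's first loop: linear search with break, compares c to parsed coordinates; no effect on the result
  let _scan := m.find? (fun p =>
    match str_para_coordenada p.1 with
    | some (some col, some lin) => col == c.1 && lin == c.2
    | _ => false)
  let o := (c.1.toList.headD 'A').toNat  -- ord(c[0]); len(c[0]) ≠ 1 raises TypeError (excluded by Pre_)
  let a11 := String.ofList (Char.ofNat (o - 1) :: fmt02 (c.2 - 1))
  let a12 := String.ofList (c.1.toList ++ fmt02 (c.2 - 1))
  let a13 := String.ofList (Char.ofNat (o + 1) :: fmt02 (c.2 - 1))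
  let a21 := String.ofList (Char.ofNat (o - 1) :: fmt02 c.2)
  let a23 := String.ofList (Char.ofNat (o + 1) :: fmt02 c.2)
  let a31 := String.ofList (Char.ofNat (o - 1) :: fmt02 (c.2 + 1))
  let a32 := String.ofList (c.1.toList ++ fmt02 (c.2 + 1))
  let a33 := String.ofList (Char.ofNat (o + 1) :: fmt02 (c.2 + 1))
  m.foldl (fun cont i =>
    if i.1 ∈ [a11, a12, a13, a21, a23, a31, a32, a33] then
      match PySem.List.pyGet? i.2 1 with
      | some s => if s = "com mina" then cont + 1 else cont
      | none => cont  -- i[1][1] is an IndexError in Python; excluded by Pre_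
    else cont) 0

-- ===== PORT B =====
def obtem_numero_minas_vizinhas_alt (m : List (String × List String)) (c : String × Int) : Int :=
  let index : PySem.Dict String Int := m.foldl (fun d i =>
    if decide (1 < i.2.length) && (PySem.List.pyGet? i.2 1 == some "com mina")
    then d.insert i.1 (d.getD i.1 0 + 1) else d) PySem.Dict.empty
  let o := (c.1.toList.headD 'A').toNat  -- ord(c[0]); len(c[0]) ≠ 1 raises in Python (excluded by Pre_)
  let viz : PySem.Set String := PySem.Set.ofList
    (([-1, 0, 1] : List Int).flatMap (fun dc =>
      ([-1, 0, 1] : List Int).filterMap (fun dr =>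
        if dc = 0 ∧ dr = 0 then none
        else some (String.ofList (Char.ofNat ((o : Int) + dc).toNat :: fmt02 (c.2 + dr))))))
  -- sum over the set: order-independent
  viz.foldl (fun t s => t + index.getD s 0) 0

-- ===== PRECONDITION & SPEC =====
-- the eight neighbor coordinate strings (A's construction), for stating Pre_
def nbrStrings (c : String × Int) : List String :=
  let o := (c.1.toList.headD 'A').toNat
  [String.ofList (Char.ofNat (o - 1) :: fmt02 (c.2 - 1)),
   String.ofList (c.1.toList ++ fmt02 (c.2 - 1)),
   String.ofList (Char.ofNat (o + 1) :: fmt02 (c.2 - 1)),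
   String.ofList (Char.ofNat (o - 1) :: fmt02 c.2),
   String.ofList (Char.ofNat (o + 1) :: fmt02 c.2),
   String.ofList (Char.ofNat (o - 1) :: fmt02 (c.2 + 1)),
   String.ofList (c.1.toList ++ fmt02 (c.2 + 1)),
   String.ofList (Char.ofNat (o + 1) :: fmt02 (c.2 + 1))]

-- Pre_ excludes exactly the inputs where Python A raises: ord(c[0]) needs a 1-character
-- string, and i[1][1] is an IndexError when an entry whose key is a neighbor string has
-- fewer than 2 cells
def Pre_obtem_numero_minas_vizinhas (m : List (String × List String)) (c : String × Int) : Prop :=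
  c.1.toList.length = 1 ∧ ∀ p ∈ m, p.1 ∈ nbrStrings c → 1 < p.2.length
instance (m : List (String × List String)) (c : String × Int) : Decidable (Pre_obtem_numero_minas_vizinhas m c) := by unfold Pre_obtem_numero_minas_vizinhas; infer_instance

def pvWitness_obtem_numero_minas_vizinhas : (List (String × List String)) × (String × Int) :=
  ([("B02", ["limpa", "com mina"]), ("A01", ["limpa", "sem mina"])], ("B", 1))

def Spec_obtem_numero_minas_vizinhas (m : List (String × List String)) (c : String × Int) (out : Int) : Prop := out = obtem_numero_minas_vizinhas_alt m c
instance (m : List (String × List String)) (c : String × Int) (out : Int) : Decidable (Spec_obtem_numero_minas_vizinhas m c out) := by unfold Spec_obtem_numero_minas_vizinhas; infer_instance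

-- ===== CLAIM (what is proved, stated in full; the proofs are below) =====
def Claim_equal_obtem_numero_minas_vizinhas : Prop := ∀ (m : List (String × List String)) (c : String × Int), Dom_obtem_numero_minas_vizinhas m c → Pre_obtem_numero_minas_vizinhas m c → Spec_obtem_numero_minas_vizinhas m c (obtem_numero_minas_vizinhas m c)

-- ===== LEMMAS AND PROOFS =====

-- proof-only abbreviations for the pieces of port B
def pvG : (String × List String) → Bool := fun i =>
  decide (1 < i.2.length) && (PySem.List.pyGet? i.2 1 == some "com mina")

def pvIndex (m : List (String × List String)) : PySem.Dict String Int :=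
  m.foldl (fun d i => if pvG i then d.insert i.1 (d.getD i.1 0 + 1) else d) PySem.Dict.empty

def pvL8 (c : String × Int) : List String :=
  let o := (c.1.toList.headD 'A').toNat
  ([-1, 0, 1] : List Int).flatMap (fun dc =>
    ([-1, 0, 1] : List Int).filterMap (fun dr =>
      if dc = 0 ∧ dr = 0 then none
      else some (String.ofList (Char.ofNat ((o : Int) + dc).toNat :: fmt02 (c.2 + dr)))))

theorem pv_mem_L8 (c : String × Int) (ch : Char) (hch : c.1.toList = [ch])
    (ho : 1 ≤ ch.toNat) (x : String) : x ∈ pvL8 c ↔ x ∈ nbrStrings c := by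
  unfold pvL8 nbrStrings
  rw [hch]
  have r1 : c.2 + -1 = c.2 - 1 := by omega
  simp only [List.headD_cons, List.flatMap_cons, List.flatMap_nil, List.filterMap_cons,
    List.filterMap_nil, List.append_nil, List.cons_append, List.nil_append]
  norm_num
  rw [r1]
  simp only [show ((ch.toNat : Int) + -1).toNat = ch.toNat - 1 from by omega,
    show ((ch.toNat : Int) + 0).toNat = ch.toNat from by omega,
    show ((ch.toNat : Int) + 1).toNat = ch.toNat + 1 from by omega, Char.ofNat_toNat]
  constructor
  · rintro (h|h|h|h|h|h|h|h)
    · exact (Or.inl h)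
    · exact (Or.inr (Or.inr (Or.inr (Or.inl h))))
    · exact (Or.inr (Or.inr (Or.inr (Or.inr (Or.inr (Or.inl h))))))
    · exact (Or.inr (Or.inl h))
    · exact (Or.inr (Or.inr (Or.inr (Or.inr (Or.inr (Or.inr (Or.inl h)))))))
    · exact (Or.inr (Or.inr (Or.inl h)))
    · exact (Or.inr (Or.inr (Or.inr (Or.inr (Or.inl h)))))
    · exact (Or.inr (Or.inr (Or.inr (Or.inr (Or.inr (Or.inr (Or.inr h)))))))
  · rintro (h|h|h|h|h|h|h|h)
    · exact (Or.inl h)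
    · exact (Or.inr (Or.inr (Or.inr (Or.inl h))))
    · exact (Or.inr (Or.inr (Or.inr (Or.inr (Or.inr (Or.inl h))))))
    · exact (Or.inr (Or.inl h))
    · exact (Or.inr (Or.inr (Or.inr (Or.inr (Or.inr (Or.inr (Or.inl h)))))))
    · exact (Or.inr (Or.inr (Or.inl h)))
    · exact (Or.inr (Or.inr (Or.inr (Or.inr (Or.inl h)))))
    · exact (Or.inr (Or.inr (Or.inr (Or.inr (Or.inr (Or.inr (Or.inr h)))))))

theorem pv_sum_if_count (T : List String) (hT : T.Nodup) (k : String) :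
    (T.map (fun s => if k = s then (1 : Int) else 0)).sum = if k ∈ T then 1 else 0 := by
  induction T with
  | nil => simp
  | cons t T ih =>
    rw [List.nodup_cons] at hT
    obtain ⟨hnm, hnd⟩ := hT
    by_cases h : k = t
    · subst h
      simp [List.map_cons, ih hnd, hnm]
    · simp [List.map_cons, ih hnd, h]

theorem pv_sum_countP (g : String × List String → Bool) (T : List String) (hT : T.Nodup)
    (m : List (String × List String)) :
    (T.map (fun s => ((m.countP (fun i => g i && i.1 == s)) : Int))).sum
      = ((m.countP (fun i => decide (i.1 ∈ T) && g i)) : Int) := by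
  induction m with
  | nil => simp
  | cons i m ih =>
    simp only [List.countP_cons, Nat.cast_add]
    rw [List.sum_map_add, ih]
    congr 1
    by_cases hg : g i = true
    · simp only [hg, Bool.true_and, Bool.and_true]
      have : (T.map (fun s => ((if (i.1 == s) = true then 1 else 0 : Nat) : Int))).sum
          = (T.map (fun s => if i.1 = s then (1 : Int) else 0)).sum := by
        apply congrArg
        apply List.map_congr_left
        intro s _
        by_cases h : i.1 = s <;> simp [h]
      rw [this, pv_sum_if_count T hT i.1]
      by_cases hm : i.1 ∈ T <;> simp [hm]
    · simp only [hg, Bool.and_false, Bool.false_and]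
      simp

theorem pv_index_getD (m : List (String × List String)) (g : String × List String → Bool)
    (s : String) :
    (m.foldl (fun d i => if g i then d.insert i.1 (d.getD i.1 0 + 1) else d)
        PySem.Dict.empty).getD s 0
      = ((m.countP (fun i => g i && i.1 == s)) : Int) := by
  have key : ∀ (l : List (String × List String)) (d : PySem.Dict String Int),
      (l.foldl (fun d i => if g i then d.insert i.1 (d.getD i.1 0 + 1) else d) d).getD s 0
        = d.getD s 0 + ((l.countP (fun i => g i && i.1 == s)) : Int) := by
    intro l
    induction l with
    | nil => intro d; simp
    | cons i l ih =>
      intro d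
      simp only [List.foldl_cons, List.countP_cons]
      by_cases hg : g i = true
      · rw [if_pos hg, ih]
        rw [PySem.Dict.getD_insert]
        by_cases h : s = i.1
        · have hb : (i.1 == s) = true := by simp [h]
          simp only [h, hg, hb, Bool.and_self]
          simp
          ring
        · have hb : (i.1 == s) = false := by simp [beq_eq_false_iff_ne]; exact fun e => h e.symm
          simp [h, hg, hb]
      · rw [if_neg hg, ih]
        simp [hg]
  rw [key m PySem.Dict.empty]
  simp [PySem.Dict.getD_empty]

-- ===== VERDICT (by name: the statement is the Claim_ definition above) =====

theorem obtem_numero_minas_vizinhas_spec : Claim_equal_obtem_numero_minas_vizinhas := by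
  intro m c hdom hpre
  unfold Spec_obtem_numero_minas_vizinhas
  obtain ⟨hlen, -⟩ := hpre
  obtain ⟨ch, hch⟩ : ∃ ch, c.1.toList = [ch] := by
    rcases h : c.1.toList with _ | ⟨a, _ | ⟨b, t⟩⟩
    · rw [h] at hlen; simp at hlen
    · exact ⟨a, rfl⟩
    · rw [h] at hlen; simp at hlen
  have hchm : ch ∈ c.1.toList := by rw [hch]; simp
  have hdc : pvDomChar ch = true := by
    simp only [Dom_obtem_numero_minas_vizinhas, Bool.and_eq_true] at hdom
    have h2 := hdom.2.1
    simp only [pvDomStr, List.all_eq_true] at h2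
    exact h2 ch hchm
  have ho : 1 ≤ ch.toNat := by
    simp only [pvDomChar, Bool.or_eq_true, Bool.and_eq_true, decide_eq_true_eq,
      beq_iff_eq] at hdc
    omega
  have hB : obtem_numero_minas_vizinhas_alt m c
      = (PySem.Set.ofList (pvL8 c)).foldl (fun t s => t + (pvIndex m).getD s 0) 0 := rfl
  have hA : obtem_numero_minas_vizinhas m c
      = m.foldl (fun cont i =>
          if i.1 ∈ nbrStrings c then
            match PySem.List.pyGet? i.2 1 with
            | some s => if s = "com mina" then cont + 1 else cont
            | none => cont
          else cont) 0 := rfl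
  have hAc : obtem_numero_minas_vizinhas m c
      = m.foldl (fun cont i =>
          if decide (i.1 ∈ nbrStrings c) && pvG i then cont + 1 else cont) 0 := by
    rw [hA]
    apply PySem.List.foldl_congr_mem
    intro cont i _
    by_cases hm : i.1 ∈ nbrStrings c
    · cases hpg : PySem.List.pyGet? i.2 1 with
      | none =>
        have hnr : ¬ PySem.Raise.InRange i.2.length 1 :=
          (PySem.List.pyGet?_eq_none_iff _ _).mp hpg
        have hlen2 : ¬ 1 < i.2.length := by
          simp only [PySem.Raise.InRange] at hnr; omega
        simp only [pvG, hpg]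
        simp [hm, hlen2]
      | some s =>
        have hr : PySem.Raise.InRange i.2.length 1 := by
          by_contra hc
          exact (by simp [hpg] : PySem.List.pyGet? i.2 1 ≠ none)
            ((PySem.List.pyGet?_eq_none_iff _ _).mpr hc)
        have hlen2 : 1 < i.2.length := by
          simp only [PySem.Raise.InRange] at hr; omega
        simp only [pvG, hpg]
        by_cases hs : s = "com mina" <;> simp [hm, hlen2, hs]
    · simp [hm, pvG]
  rw [hAc, hB, PySem.List.foldl_if_add_one, PySem.List.foldl_add]
  have hmap : (PySem.Set.ofList (pvL8 c)).map (fun s => (pvIndex m).getD s 0)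
      = (PySem.Set.ofList (pvL8 c)).map
          (fun s => ((m.countP (fun i => pvG i && i.1 == s)) : Int)) := by
    apply List.map_congr_left
    intro s _
    exact pv_index_getD m pvG s
  rw [hmap, pv_sum_countP pvG _ (PySem.Set.nodup_ofList _) m]
  simp only [zero_add]
  rw [Nat.cast_inj]
  apply List.countP_congr
  intro i _
  have hmem : (i.1 ∈ PySem.Set.ofList (pvL8 c)) ↔ i.1 ∈ nbrStrings c := by
    rw [PySem.Set.mem_ofList]
    exact pv_mem_L8 c ch hch ho i.1
  rw [decide_eq_decide.mpr hmem]
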